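-- pv_equiv track=rewrite | github.com/woragis/data-structures-and-algorithms | data-structures/7-matrix.py | matrixDiagonal
-- ===== SOURCE A (Python) =====
-- def matrixDiagonal(matrix):
--     main_d = []
--     secondary_d = []
--     for row in range(len(matrix)):
--         for column in range(len(matrix[row])):
--             if row == column:
--                 main_d.append(matrix[row][column])
--             if row == abs((column-len(matrix)))-1:
--                 secondary_d.append(matrix[row][column])
--     return [main_d, secondary_d]
-- ===== SOURCE B (Python) =====
-- def matrixDiagonal(matrix):
--     n = len(matrix)
--     main_d = []
--     secondary_d = []
--     for i, row in enumerate(matrix):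
--         if i < len(row):
--             main_d.append(row[i])
--         j = n - 1 - i
--         if j < len(row):
--             secondary_d.append(row[j])
--     return [main_d, secondary_d]
-- ===== Notes on version B (the rewrite author's own statement) =====
-- stated objective: faster
-- what changed: B replaces A's double loop over every cell (testing each cell's indices against both diagonal conditions) with one pass over the rows that directly indexes the main- and secondary-diagonal position of each row.
-- intended difference: On matrices where some row i is longer than i + len(matrix) + 1, A's accidental abs(column - len(matrix)) - 1 test also matches the non-diagonal cell at column i + len(matrix) + 1 and appends it to the secondary diagonal; B returns only the true secondary-diagonal entries, which is the intended value. — e.g. on matrixDiagonal([[1, 2, 3]]): A returns [[1], [1, 3]], B returns [[1], [1]]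
import Mathlib
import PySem

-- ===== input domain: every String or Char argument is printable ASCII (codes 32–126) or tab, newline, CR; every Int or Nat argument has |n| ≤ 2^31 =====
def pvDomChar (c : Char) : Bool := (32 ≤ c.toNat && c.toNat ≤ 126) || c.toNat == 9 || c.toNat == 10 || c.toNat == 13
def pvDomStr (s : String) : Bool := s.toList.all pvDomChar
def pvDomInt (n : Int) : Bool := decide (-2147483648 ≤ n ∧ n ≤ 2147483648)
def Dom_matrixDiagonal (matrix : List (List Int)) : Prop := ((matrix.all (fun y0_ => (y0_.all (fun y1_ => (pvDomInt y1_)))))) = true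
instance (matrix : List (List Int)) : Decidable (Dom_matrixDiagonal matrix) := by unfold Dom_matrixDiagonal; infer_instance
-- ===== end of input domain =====

-- B replaces A's scan of every cell by direct indexing of the two diagonal positions of
-- each row: one pass over the rows instead of a pass over all cells (asymptotically faster).

-- ===== PORT A =====
def matrixDiagonal (matrix : List (List Int)) : List (List Int) :=
  let res := (PySem.List.pyRange 0 (matrix.length : Int) 1).foldl
    (fun (st : List Int × List Int) row =>
      (PySem.List.pyRange 0 ((PySem.List.pyGetD matrix row []).length : Int) 1).foldl
        (fun st column =>
          let st := if row = column then
              (st.1 ++ [PySem.List.pyGetD (PySem.List.pyGetD matrix row []) column 0], st.2)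
            else st
          if row = (((column - (matrix.length : Int)).natAbs : Int)) - 1 then
              (st.1, st.2 ++ [PySem.List.pyGetD (PySem.List.pyGetD matrix row []) column 0])
            else st)
        st)
    ([], [])
  [res.1, res.2]

-- ===== PORT B =====
def matrixDiagonal_alt (matrix : List (List Int)) : List (List Int) :=
  let n : Int := matrix.length
  let res := (PySem.List.enumerate matrix 0).foldl
    (fun (st : List Int × List Int) p =>
      let i := p.1
      let row := p.2
      let st := if i < (row.length : Int) then (st.1 ++ [PySem.List.pyGetD row i 0], st.2) else st
      let j := n - 1 - i
      if j < (row.length : Int) then (st.1, st.2 ++ [PySem.List.pyGetD row j 0]) else st)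
    ([], [])
  [res.1, res.2]

-- ===== PRECONDITION & SPEC =====
-- On matrices where some row i is longer than i + len(matrix) + 1, A's accidental
-- abs(column - len(matrix)) - 1 test matches a second, non-diagonal cell of that row and A
-- appends it to the secondary diagonal; B returns only the true secondary-diagonal entries,
-- which is the intended value.
def D_matrixDiagonal (matrix : List (List Int)) : Prop :=
  ((List.range matrix.length).any
    (fun i => decide (i + matrix.length + 1 < (matrix.getD i []).length))) = true
instance (matrix : List (List Int)) : Decidable (D_matrixDiagonal matrix) := by
  unfold D_matrixDiagonal; infer_instance

def Spec_matrixDiagonal (matrix : List (List Int)) (out : List (List Int)) : Prop :=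
  ¬ D_matrixDiagonal matrix → out = matrixDiagonal_alt matrix
instance (matrix : List (List Int)) (out : List (List Int)) : Decidable (Spec_matrixDiagonal matrix out) := by
  unfold Spec_matrixDiagonal; infer_instance

def pvDiffWitness_matrixDiagonal : List (List Int) := [[1, 2, 3]]
def pvDiffWitnessOut_matrixDiagonal : (List (List Int)) × (List (List Int)) :=
  ([[1], [1, 3]], [[1], [1]])

-- ===== CLAIM (what is proved, stated in full; the proofs are below) =====
def Claim_unchanged_matrixDiagonal : Prop := ∀ (matrix : List (List Int)), Dom_matrixDiagonal matrix → Spec_matrixDiagonal matrix (matrixDiagonal matrix)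
def Claim_changed_matrixDiagonal : Prop := Dom_matrixDiagonal (pvDiffWitness_matrixDiagonal) ∧ D_matrixDiagonal (pvDiffWitness_matrixDiagonal) ∧ matrixDiagonal (pvDiffWitness_matrixDiagonal) = pvDiffWitnessOut_matrixDiagonal.1 ∧ matrixDiagonal_alt (pvDiffWitness_matrixDiagonal) = pvDiffWitnessOut_matrixDiagonal.2 ∧ pvDiffWitnessOut_matrixDiagonal.1 ≠ pvDiffWitnessOut_matrixDiagonal.2
def Claim_exact_matrixDiagonal : Prop := ∀ (matrix : List (List Int)), Dom_matrixDiagonal matrix → D_matrixDiagonal matrix → matrixDiagonal matrix ≠ matrixDiagonal_alt matrix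

-- ===== LEMMAS AND PROOFS =====

-- the single main-diagonal contribution of row i
def eMain (matrix : List (List Int)) (i : Int) : List Int :=
  if i < ((PySem.List.pyGetD matrix i []).length : Int) then
    [PySem.List.pyGetD (PySem.List.pyGetD matrix i []) i 0] else []

-- the true secondary-diagonal contribution of row i
def eSec (matrix : List (List Int)) (i : Int) : List Int :=
  if (matrix.length : Int) - 1 - i < ((PySem.List.pyGetD matrix i []).length : Int) then
    [PySem.List.pyGetD (PySem.List.pyGetD matrix i []) ((matrix.length : Int) - 1 - i) 0] else []

-- A's accidental second match in row i (column i + n + 1), if that cell exists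
def eExtra (matrix : List (List Int)) (i : Int) : List Int :=
  if i + (matrix.length : Int) + 1 < ((PySem.List.pyGetD matrix i []).length : Int) then
    [PySem.List.pyGetD (PySem.List.pyGetD matrix i []) (i + (matrix.length : Int) + 1) 0] else []

-- columns c in range(m) with i = c : exactly [i] when 0 ≤ i < m
lemma filter_eq_idx (m : Nat) (i : Int) :
    (PySem.List.pyRange 0 (m : Int) 1).filter (fun c => decide (i = c)) =
      if 0 ≤ i ∧ i < (m : Int) then [i] else [] := by
  induction m with
  | zero =>
    rw [Nat.cast_zero, PySem.List.pyRange_one_eq_nil le_rfl]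
    simp only [List.filter_nil]
    rw [if_neg (by omega)]
  | succ m ih =>
    have h : ((m + 1 : Nat) : Int) = (m : Int) + 1 := by push_cast; ring
    rw [h, PySem.List.pyRange_one_succ_right (by positivity), List.filter_append, ih]
    by_cases hc : i = (m : Int)
    · rw [if_neg (by omega), if_pos (by omega)]
      simp [hc]
    · have hd : (decide (i = (m : Int))) = false := decide_eq_false hc
      simp only [List.filter_cons, List.filter_nil, hd, Bool.false_eq_true, if_false]
      by_cases hp : 0 ≤ i ∧ i < (m : Int)
      · rw [if_pos hp, if_pos (by omega)]; simp
      · rw [if_neg hp, if_neg (by omega)]; simp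

-- columns c in range(m) with i = |c - n| - 1 : positions n-1-i and i+n+1 (for 0 ≤ i < n)
lemma filter_eq_sec (m : Nat) (n i : Int) (h0 : 0 ≤ i) (h1 : i < n) :
    (PySem.List.pyRange 0 (m : Int) 1).filter
        (fun c => decide (i = (((c - n).natAbs : Int)) - 1)) =
      (if n - 1 - i < (m : Int) then [n - 1 - i] else []) ++
      (if i + n + 1 < (m : Int) then [i + n + 1] else []) := by
  induction m with
  | zero =>
    rw [Nat.cast_zero, PySem.List.pyRange_one_eq_nil le_rfl]
    simp only [List.filter_nil]
    rw [if_neg (by omega), if_neg (by omega)]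
    rfl
  | succ m ih =>
    have h : ((m + 1 : Nat) : Int) = (m : Int) + 1 := by push_cast; ring
    rw [h, PySem.List.pyRange_one_succ_right (by positivity), List.filter_append, ih]
    by_cases hc : i = ((((m : Int)) - n).natAbs : Int) - 1
    · have hd : (decide (i = ((((m : Int)) - n).natAbs : Int) - 1)) = true := decide_eq_true hc
      simp only [List.filter_cons, List.filter_nil, hd, if_true]
      rcases (show (m : Int) = n - 1 - i ∨ (m : Int) = i + n + 1 by omega) with hm | hm
      · rw [if_neg (by omega), if_neg (by omega), if_pos (by omega), if_neg (by omega)]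
        simp [hm]
      · rw [if_pos (by omega), if_neg (by omega), if_pos (by omega), if_pos (by omega)]
        simp [hm]
    · have hd : (decide (i = ((((m : Int)) - n).natAbs : Int) - 1)) = false := decide_eq_false hc
      simp only [List.filter_cons, List.filter_nil, hd, Bool.false_eq_true, if_false]
      have hne1 : ¬ ((m : Int) = n - 1 - i) := fun h' => hc (by omega)
      have hne2 : ¬ ((m : Int) = i + n + 1) := fun h' => hc (by omega)
      by_cases p1 : n - 1 - i < (m : Int) <;> by_cases p2 : i + n + 1 < (m : Int)
      · rw [if_pos p1, if_pos p2, if_pos (by omega), if_pos (by omega)]; simp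
      · rw [if_pos p1, if_neg p2, if_pos (by omega), if_neg (by omega)]; simp
      · rw [if_neg p1, if_pos p2, if_neg (by omega), if_pos (by omega)]; simp
      · rw [if_neg p1, if_neg p2, if_neg (by omega), if_neg (by omega)]; simp

-- A's inner column loop over row i appends eMain to the first and eSec ++ eExtra to the second accumulator
lemma inner_eq (matrix : List (List Int)) (i : Int) (h0 : 0 ≤ i) (h1 : i < (matrix.length : Int))
    (st : List Int × List Int) :
    (PySem.List.pyRange 0 (((PySem.List.pyGetD matrix i []).length : Int)) 1).foldl
        (fun st column =>
          let st := if i = column then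
              (st.1 ++ [PySem.List.pyGetD (PySem.List.pyGetD matrix i []) column 0], st.2)
            else st
          if i = (((column - (matrix.length : Int)).natAbs : Int)) - 1 then
              (st.1, st.2 ++ [PySem.List.pyGetD (PySem.List.pyGetD matrix i []) column 0])
            else st)
        st =
      (st.1 ++ eMain matrix i, st.2 ++ (eSec matrix i ++ eExtra matrix i)) := by
  have hbody : (fun (st : List Int × List Int) (column : Int) =>
        let st := if i = column then
            (st.1 ++ [PySem.List.pyGetD (PySem.List.pyGetD matrix i []) column 0], st.2)
          else st
        if i = (((column - (matrix.length : Int)).natAbs : Int)) - 1 then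
            (st.1, st.2 ++ [PySem.List.pyGetD (PySem.List.pyGetD matrix i []) column 0])
          else st) =
      (fun st column =>
        ((if i = column then st.1 ++ [PySem.List.pyGetD (PySem.List.pyGetD matrix i []) column 0] else st.1),
         (if i = (((column - (matrix.length : Int)).natAbs : Int)) - 1 then
            st.2 ++ [PySem.List.pyGetD (PySem.List.pyGetD matrix i []) column 0] else st.2))) := by
    funext st column
    dsimp only
    split_ifs <;> rfl
  rw [hbody]
  rw [PySem.List.foldl_prod_mk
    (f := fun acc column => if i = column then acc ++ [PySem.List.pyGetD (PySem.List.pyGetD matrix i []) column 0] else acc)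
    (g := fun acc column => if i = (((column - (matrix.length : Int)).natAbs : Int)) - 1 then
        acc ++ [PySem.List.pyGetD (PySem.List.pyGetD matrix i []) column 0] else acc)]
  rw [PySem.List.foldl_append_ite (p := fun c => i = c)
        (f := fun c => PySem.List.pyGetD (PySem.List.pyGetD matrix i []) c 0),
      PySem.List.foldl_append_ite (p := fun c => i = (((c - (matrix.length : Int)).natAbs : Int)) - 1)
        (f := fun c => PySem.List.pyGetD (PySem.List.pyGetD matrix i []) c 0)]
  rw [filter_eq_idx, filter_eq_sec _ (matrix.length : Int) i h0 h1]
  unfold eMain eSec eExtra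
  by_cases c1 : i < ((PySem.List.pyGetD matrix i []).length : Int) <;>
    by_cases c2 : (matrix.length : Int) - 1 - i < ((PySem.List.pyGetD matrix i []).length : Int) <;>
      by_cases c3 : i + (matrix.length : Int) + 1 < ((PySem.List.pyGetD matrix i []).length : Int) <;>
        simp [c1, c2, c3, h0]

-- A's result as two flat maps over the row indices
lemma A_form (matrix : List (List Int)) :
    matrixDiagonal matrix =
      [(PySem.List.pyRange 0 (matrix.length : Int) 1).flatMap (eMain matrix),
       (PySem.List.pyRange 0 (matrix.length : Int) 1).flatMap
         (fun i => eSec matrix i ++ eExtra matrix i)] := by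
  unfold matrixDiagonal
  have h : (PySem.List.pyRange 0 (matrix.length : Int) 1).foldl
      (fun (st : List Int × List Int) row =>
        (PySem.List.pyRange 0 ((PySem.List.pyGetD matrix row []).length : Int) 1).foldl
          (fun st column =>
            let st := if row = column then
                (st.1 ++ [PySem.List.pyGetD (PySem.List.pyGetD matrix row []) column 0], st.2)
              else st
            if row = (((column - (matrix.length : Int)).natAbs : Int)) - 1 then
                (st.1, st.2 ++ [PySem.List.pyGetD (PySem.List.pyGetD matrix row []) column 0])
              else st)
          st)
      ([], []) =
      (PySem.List.pyRange 0 (matrix.length : Int) 1).foldl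
        (fun (st : List Int × List Int) i =>
          (st.1 ++ eMain matrix i, st.2 ++ (eSec matrix i ++ eExtra matrix i)))
        ([], []) := by
    apply PySem.List.foldl_congr_mem
    intro st i hi
    rw [PySem.List.mem_pyRange_one] at hi
    exact inner_eq matrix i hi.1 hi.2 st
  rw [h]
  rw [PySem.List.foldl_prod_mk
    (f := fun acc i => acc ++ eMain matrix i)
    (g := fun acc i => acc ++ (eSec matrix i ++ eExtra matrix i))]
  rw [PySem.List.foldl_append_eq_flatMap, PySem.List.foldl_append_eq_flatMap]
  simp

-- B's result as two flat maps over the row indices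
lemma B_form (matrix : List (List Int)) :
    matrixDiagonal_alt matrix =
      [(PySem.List.pyRange 0 (matrix.length : Int) 1).flatMap (eMain matrix),
       (PySem.List.pyRange 0 (matrix.length : Int) 1).flatMap (eSec matrix)] := by
  unfold matrixDiagonal_alt
  simp only [PySem.List.enumerate_eq_map_pyRange (d := ([] : List Int)), List.foldl_map,
    PySem.List.len]
  have h2 : [((PySem.List.pyRange 0 (matrix.length : Int) 1).foldl
        (fun (st : List Int × List Int) i => (st.1 ++ eMain matrix i, st.2 ++ eSec matrix i))
        ([], [])).1,
      ((PySem.List.pyRange 0 (matrix.length : Int) 1).foldl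
        (fun (st : List Int × List Int) i => (st.1 ++ eMain matrix i, st.2 ++ eSec matrix i))
        ([], [])).2] =
      [(PySem.List.pyRange 0 (matrix.length : Int) 1).flatMap (eMain matrix),
       (PySem.List.pyRange 0 (matrix.length : Int) 1).flatMap (eSec matrix)] := by
    rw [PySem.List.foldl_prod_mk
      (f := fun acc i => acc ++ eMain matrix i)
      (g := fun acc i => acc ++ eSec matrix i)]
    rw [PySem.List.foldl_append_eq_flatMap, PySem.List.foldl_append_eq_flatMap]
    simp
  refine Eq.trans (congrArg (fun r : List Int × List Int => [r.1, r.2]) ?_) h2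
  apply PySem.List.foldl_congr_mem
  intro st i _
  unfold eMain eSec
  split_ifs <;> simp

-- outside D_, row i never reaches column i + n + 1
lemma eExtra_nil (matrix : List (List Int)) (hD : ¬ D_matrixDiagonal matrix)
    (i : Int) (h0 : 0 ≤ i) (h1 : i < (matrix.length : Int)) : eExtra matrix i = [] := by
  unfold D_matrixDiagonal at hD
  simp only [List.any_eq_true, List.mem_range, decide_eq_true_eq, not_exists, not_and, not_lt] at hD
  have hk := hD i.toNat (by omega)
  have hget : PySem.List.pyGetD matrix i [] = matrix.getD i.toNat [] := by
    conv_lhs => rw [show i = ((i.toNat : Nat) : Int) by omega]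
    rw [PySem.List.pyGetD_natCast]
  unfold eExtra
  rw [hget, if_neg (by omega)]

-- ===== VERDICT (by name: the statement is the Claim_ definition above) =====
theorem matrixDiagonal_spec : Claim_unchanged_matrixDiagonal := by
  intro matrix _ hD'
  rw [A_form, B_form]
  have : ∀ i ∈ PySem.List.pyRange 0 (matrix.length : Int) 1,
      eSec matrix i ++ eExtra matrix i = eSec matrix i := by
    intro i hi
    rw [PySem.List.mem_pyRange_one] at hi
    rw [eExtra_nil matrix hD' i hi.1 hi.2, List.append_nil]
  rw [List.flatMap_congr this]

theorem matrixDiagonal_changed : Claim_changed_matrixDiagonal := by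
  unfold Claim_changed_matrixDiagonal; decide

theorem matrixDiagonal_tight : Claim_exact_matrixDiagonal := by
  intro matrix _ hD hEq
  rw [A_form, B_form] at hEq
  have h2 := (List.cons.injEq _ _ _ _).mp hEq |>.2
  have h2' := (List.cons.injEq _ _ _ _).mp h2 |>.1
  have hlen := congrArg List.length h2'
  simp only [List.length_flatMap] at hlen
  unfold D_matrixDiagonal at hD
  simp only [List.any_eq_true, List.mem_range, decide_eq_true_eq] at hD
  obtain ⟨k, hk, hklt⟩ := hD
  have hmem : ((k : Nat) : Int) ∈ PySem.List.pyRange 0 (matrix.length : Int) 1 := by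
    rw [PySem.List.mem_pyRange_one]; omega
  have hx : (eExtra matrix (k : Int)).length = 1 := by
    unfold eExtra
    rw [if_pos]
    · rfl
    · rw [PySem.List.pyGetD_natCast]; omega
  -- sum of (|eSec i| + |eExtra i|) equals sum of |eSec i|, yet the eExtra term at k is 1
  have hsplit : ∀ (l : List Int),
      (l.map (fun i => (eSec matrix i).length + (eExtra matrix i).length)).sum =
        (l.map (fun i => (eSec matrix i).length)).sum +
        (l.map (fun i => (eExtra matrix i).length)).sum := by
    intro l
    induction l with
    | nil => simp
    | cons a t ih => simp only [List.map_cons, List.sum_cons, ih]; omega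
  have hsum : ((PySem.List.pyRange 0 (matrix.length : Int) 1).map
      (fun i => (eExtra matrix i).length)).sum = 0 := by
    simp only [List.length_append] at hlen
    have := hsplit (PySem.List.pyRange 0 (matrix.length : Int) 1)
    omega
  have hle : (eExtra matrix ((k : Nat) : Int)).length ≤
      ((PySem.List.pyRange 0 (matrix.length : Int) 1).map
        (fun i => (eExtra matrix i).length)).sum :=
    List.single_le_sum (by intro x _; omega) _ (List.mem_map_of_mem hmem)
  omega
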